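-- pv_equiv track=rewrite | github.com/ozbudak/STARMethods_2022 | plot_noise.py | binData_fix_single_her1_gene
-- ===== SOURCE A (Python) =====
-- bin_range = [45,80,100,125,300] # Fix bin range defined
--
-- def binData_fix_single_her1_gene(slice_mean, slice_total): # group noise levels based on Fixed expression value
-- 	num_bins = len(bin_range)
-- 	binned_x = []
-- 	binned_total = []
-- 	for i in range(num_bins):
-- 		binned_x.append([])
-- 		binned_total.append([])
-- 	for i in range(len(slice_mean)):
-- 		for j in range(num_bins):
-- 			if slice_mean[i]<=bin_range[j]:
-- 				binned_x[j].append(slice_mean[i])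
-- 				binned_total[j].append(slice_total[i])
-- 				break
-- 	return	binned_x, binned_total
-- ===== SOURCE B (Python) =====
-- bin_range = [45, 80, 100, 125, 300]  # Fix bin range defined
--
--
-- def binData_fix_single_her1_gene(slice_mean, slice_total):
--     # Binary search (hand-rolled bisect_left) for the bin instead of the
--     # linear scan-and-break; iterate pairs instead of indices.
--     num_bins = len(bin_range)
--     binned_x = [[] for _ in range(num_bins)]
--     binned_total = [[] for _ in range(num_bins)]
--     for x, t in zip(slice_mean, slice_total):
--         lo, hi = 0, num_bins
--         while lo < hi:
--             mid = (lo + hi) // 2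
--             if bin_range[mid] < x:
--                 lo = mid + 1
--             else:
--                 hi = mid
--         if lo < num_bins:
--             binned_x[lo].append(x)
--             binned_total[lo].append(t)
--     return binned_x, binned_total
-- ===== Notes on version B (the rewrite author's own statement) =====
-- stated objective: alternative
-- what changed: Replaces the inner linear scan-and-break over the bin bounds by a hand-rolled bisect_left binary search for the target bin, and iterates (value, total) pairs via zip instead of indexing both lists.
import Mathlib
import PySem

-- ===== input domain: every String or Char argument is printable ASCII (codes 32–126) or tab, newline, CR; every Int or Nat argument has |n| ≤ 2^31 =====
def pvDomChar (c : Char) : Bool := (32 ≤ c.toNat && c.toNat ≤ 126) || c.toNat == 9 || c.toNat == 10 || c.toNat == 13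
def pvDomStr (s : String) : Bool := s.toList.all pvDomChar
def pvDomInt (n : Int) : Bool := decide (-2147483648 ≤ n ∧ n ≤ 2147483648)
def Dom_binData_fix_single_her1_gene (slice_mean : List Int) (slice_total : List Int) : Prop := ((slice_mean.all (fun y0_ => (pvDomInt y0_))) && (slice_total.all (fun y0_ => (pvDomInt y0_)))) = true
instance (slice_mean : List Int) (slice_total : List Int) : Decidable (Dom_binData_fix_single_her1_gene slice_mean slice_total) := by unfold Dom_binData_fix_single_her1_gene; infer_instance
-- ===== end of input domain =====

-- B replaces A's inner scan-and-break over the bin bounds with a hand-rolled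
-- bisect_left binary search and iterates zipped (value, total) pairs; same cost class.


-- ===== PORT A =====
def pvBinRange : List Int := [45, 80, 100, 125, 300]

-- inner 'for j in range(num_bins): if slice_mean[i] <= bin_range[j]: append; break'
-- (j is always a nonnegative in-range index, so getD/set on j.toNat is exact)
def pvInnerA (x t : Int) : List Int → List (List Int) × List (List Int) → List (List Int) × List (List Int)
  | [], s => s
  | j :: js, s =>
    if x ≤ PySem.List.pyGetD pvBinRange j 0 then
      (s.1.set j.toNat (s.1.getD j.toNat [] ++ [x]),
       s.2.set j.toNat (s.2.getD j.toNat [] ++ [t]))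
    else pvInnerA x t js s

def binData_fix_single_her1_gene (slice_mean : List Int) (slice_total : List Int) : List (List Int) × List (List Int) :=
  let num_bins : Int := (pvBinRange.length : Int)
  let init : List (List Int) × List (List Int) :=
    (PySem.List.pyRange 0 num_bins 1).foldl (fun s _ => (s.1 ++ [[]], s.2 ++ [[]])) ([], [])
  (PySem.List.pyRange 0 (slice_mean.length : Int) 1).foldl
    (fun s i =>
      pvInnerA (PySem.List.pyGetD slice_mean i 0) (PySem.List.pyGetD slice_total i 0)
        (PySem.List.pyRange 0 num_bins 1) s)
    init

-- ===== PORT B =====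
-- hand-rolled bisect_left while-loop from Source B (lo, hi stay nonnegative, so Nat with
-- Nat division matches Python's '//' here)
def pvBisect (x : Int) (lo hi : Nat) : Nat :=
  if h : lo < hi then
    let mid := (lo + hi) / 2
    if PySem.List.pyGetD pvBinRange (mid : Int) 0 < x then pvBisect x (mid + 1) hi
    else pvBisect x lo mid
  else lo
termination_by hi - lo
decreasing_by all_goals omega

def binData_fix_single_her1_gene_alt (slice_mean : List Int) (slice_total : List Int) : List (List Int) × List (List Int) :=
  let n := pvBinRange.length
  (slice_mean.zip slice_total).foldl
    (fun s p =>
      let j := pvBisect p.1 0 n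
      if j < n then
        (s.1.set j (s.1.getD j [] ++ [p.1]), s.2.set j (s.2.getD j [] ++ [p.2]))
      else s)
    (List.replicate n [], List.replicate n [])

-- ===== PRECONDITION & SPEC =====
-- Pre_ excludes exactly the inputs on which A raises IndexError: an index i with
-- slice_mean[i] <= 300 (so a bin matches) but i >= len(slice_total).
def Pre_binData_fix_single_her1_gene (slice_mean : List Int) (slice_total : List Int) : Prop :=
  ∀ i ∈ List.range slice_mean.length, slice_mean.getD i 0 ≤ 300 → i < slice_total.length
instance (slice_mean : List Int) (slice_total : List Int) : Decidable (Pre_binData_fix_single_her1_gene slice_mean slice_total) := by unfold Pre_binData_fix_single_her1_gene; infer_instance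

def pvWitness_binData_fix_single_her1_gene : List Int × List Int := ([50, 400, 120], [7, 8, 9])

def Spec_binData_fix_single_her1_gene (slice_mean : List Int) (slice_total : List Int) (out : List (List Int) × List (List Int)) : Prop := out = binData_fix_single_her1_gene_alt slice_mean slice_total
instance (slice_mean : List Int) (slice_total : List Int) (out : List (List Int) × List (List Int)) : Decidable (Spec_binData_fix_single_her1_gene slice_mean slice_total out) := by unfold Spec_binData_fix_single_her1_gene; infer_instance

-- ===== CLAIM (what is proved, stated in full; the proofs are below) =====
def Claim_equal_binData_fix_single_her1_gene : Prop := ∀ (slice_mean : List Int) (slice_total : List Int), Dom_binData_fix_single_her1_gene slice_mean slice_total → Pre_binData_fix_single_her1_gene slice_mean slice_total → Spec_binData_fix_single_her1_gene slice_mean slice_total (binData_fix_single_her1_gene slice_mean slice_total)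

-- ===== LEMMAS AND PROOFS =====

-- the bisect loop on the five fixed bounds, in closed form
lemma pvBisect_eval (x : Int) :
    pvBisect x 0 5 = if x ≤ 45 then 0 else if x ≤ 80 then 1 else if x ≤ 100 then 2
      else if x ≤ 125 then 3 else if x ≤ 300 then 4 else 5 := by
  simp [pvBisect, pvBinRange, PySem.List.pyGetD]
  split_ifs <;> omega

-- A's inner loop equals B's bisect-then-append step, for any state
lemma step_eq (x t : Int) (s : List (List Int) × List (List Int)) :
    pvInnerA x t (PySem.List.pyRange 0 ((pvBinRange.length : Int)) 1) s =
      (if pvBisect x 0 pvBinRange.length < pvBinRange.length then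
         (s.1.set (pvBisect x 0 pvBinRange.length)
            (s.1.getD (pvBisect x 0 pvBinRange.length) [] ++ [x]),
          s.2.set (pvBisect x 0 pvBinRange.length)
            (s.2.getD (pvBisect x 0 pvBinRange.length) [] ++ [t]))
       else s) := by
  have hr : PySem.List.pyRange 0 ((pvBinRange.length : Int)) 1 = [0, 1, 2, 3, 4] := by decide
  rw [hr, show pvBinRange.length = 5 from rfl, pvBisect_eval]
  simp only [pvInnerA,
    show PySem.List.pyGetD pvBinRange 0 0 = 45 from by decide,
    show PySem.List.pyGetD pvBinRange 1 0 = 80 from by decide,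
    show PySem.List.pyGetD pvBinRange 2 0 = 100 from by decide,
    show PySem.List.pyGetD pvBinRange 3 0 = 125 from by decide,
    show PySem.List.pyGetD pvBinRange 4 0 = 300 from by decide]
  norm_num
  split_ifs <;> simp_all

lemma step_noop (x t : Int) (s : List (List Int) × List (List Int)) (hx : 300 < x) :
    pvInnerA x t (PySem.List.pyRange 0 ((pvBinRange.length : Int)) 1) s = s := by
  have h5 : pvBisect x 0 5 = 5 := by rw [pvBisect_eval]; split_ifs <;> omega
  rw [step_eq]
  simp [show pvBinRange.length = 5 from rfl, h5]

-- the index-driven outer loop over slice_mean equals the zip-driven loop, given Pre_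
lemma fold_idx_eq_zip (g : Int → Int → (List (List Int) × List (List Int)) → List (List Int) × List (List Int))
    (hno : ∀ x t s, 300 < x → g x t s = s) :
    ∀ (sm st : List Int) (s : List (List Int) × List (List Int)),
      (∀ i ∈ List.range sm.length, sm.getD i 0 ≤ 300 → i < st.length) →
      (List.range sm.length).foldl (fun s i => g (sm.getD i 0) (st.getD i 0) s) s =
        (sm.zip st).foldl (fun s p => g p.1 p.2 s) s := by
  intro sm
  induction sm with
  | nil => intro st s _; simp
  | cons x sm' ih =>
    intro st s hpre
    simp only [List.length_cons]
    rw [List.range_succ_eq_map]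
    simp only [List.foldl_cons, List.foldl_map]
    cases st with
    | cons t st' =>
      simp only [List.getD_cons_zero, List.getD_cons_succ, List.zip_cons_cons, List.foldl_cons]
      exact ih st' _ (fun i hi hle => by
        have := hpre (i + 1) (by simp at hi ⊢; omega) (by simpa using hle)
        simpa using this)
    | nil =>
      -- every element of slice_mean exceeds 300, so every step is a no-op
      have hall : ∀ i ∈ List.range (x :: sm').length, 300 < (x :: sm').getD i 0 := by
        intro i hi
        by_contra hle
        exact absurd (hpre i hi (by omega)) (by simp)
      have h0 : 300 < x := by simpa using hall 0 (by simp)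
      simp only [List.getD_cons_zero, List.zip_nil_right, List.foldl_nil]
      rw [hno x _ s h0]
      rw [PySem.List.foldl_congr_mem _ _ (fun s (_ : Nat) => s) s
        (by intro acc i hi
            have h1 : 300 < sm'.getD i 0 := by
              have := hall (i + 1) (by simp at hi ⊢; omega)
              simpa using this
            exact hno _ _ _ (by simpa [List.getD] using h1))]
      exact PySem.List.foldl_ignore _ _

-- ===== VERDICT (by name: the statement is the Claim_ definition above) =====
theorem binData_fix_single_her1_gene_spec : Claim_equal_binData_fix_single_her1_gene := by
  intro sm st _ hpre
  unfold Spec_binData_fix_single_her1_gene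
  unfold binData_fix_single_her1_gene binData_fix_single_her1_gene_alt
  simp only []
  have hinit : (PySem.List.pyRange 0 ((pvBinRange.length : Int)) 1).foldl
      (fun (s : List (List Int) × List (List Int)) _ => (s.1 ++ [[]], s.2 ++ [[]])) ([], []) =
      (List.replicate pvBinRange.length [], List.replicate pvBinRange.length []) := by decide
  rw [hinit]
  have hrange : PySem.List.pyRange 0 ((sm.length : Nat) : Int) 1 =
      (List.range sm.length).map (fun k => ((k : Nat) : Int)) := by
    rw [PySem.List.pyRange_one]; simp
  rw [hrange, List.foldl_map]
  have hbody : ∀ (s : List (List Int) × List (List Int)) (i : Nat),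
      pvInnerA (PySem.List.pyGetD sm ((i : Nat) : Int) 0) (PySem.List.pyGetD st ((i : Nat) : Int) 0)
        (PySem.List.pyRange 0 ((pvBinRange.length : Int)) 1) s =
      pvInnerA (sm.getD i 0) (st.getD i 0) (PySem.List.pyRange 0 ((pvBinRange.length : Int)) 1) s := by
    intro s i; rw [PySem.List.pyGetD_natCast, PySem.List.pyGetD_natCast]
  simp only [hbody]
  rw [fold_idx_eq_zip (fun x t s => pvInnerA x t (PySem.List.pyRange 0 ((pvBinRange.length : Int)) 1) s)
      (fun x t s hx => step_noop x t s hx) sm st _ hpre]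
  refine PySem.List.foldl_congr_mem _ _ _ _ ?_
  intro acc p _
  exact step_eq p.1 p.2 acc
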